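-- pv_equiv track=rewrite | github.com/Normale/Notes | square_sums.py | tst
-- ===== SOURCE A (Python) =====
-- def tst(n):
--     lista = []
--     for i in range(1, n):
--         if (i**2 <= 2*n):
--             lista.append(i**2)
--         else:
--             return lista
--     return lista
-- ===== SOURCE B (Python) =====
-- import math
--
-- def tst(n):
--     # closed-form stopping index: largest i with i*i <= 2*n, capped by range(1, n)
--     k = min(n - 1, math.isqrt(max(0, 2 * n)))
--     return [i * i for i in range(1, k + 1)]
-- ===== Notes on version B (the rewrite author's own statement) =====
-- stated objective: alternative
-- what changed: Replaced the iterate-square-test-early-return loop with a closed-form stopping index k = min(n-1, isqrt(max(0, 2n))) followed by a plain square emission over range(1, k+1).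
import Mathlib
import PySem

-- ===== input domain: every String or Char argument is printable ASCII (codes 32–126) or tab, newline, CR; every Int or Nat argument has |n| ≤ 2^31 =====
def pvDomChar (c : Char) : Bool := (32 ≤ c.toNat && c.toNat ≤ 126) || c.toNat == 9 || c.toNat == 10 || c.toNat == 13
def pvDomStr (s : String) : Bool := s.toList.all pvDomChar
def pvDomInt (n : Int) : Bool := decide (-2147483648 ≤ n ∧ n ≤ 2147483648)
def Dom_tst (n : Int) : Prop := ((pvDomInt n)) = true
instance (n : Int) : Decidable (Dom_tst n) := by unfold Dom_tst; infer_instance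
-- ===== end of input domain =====

-- B replaces A's iterate-test-early-return loop by a closed-form stopping index
-- (integer square root) and a plain square emission (objective: alternative).

-- ===== PORT A =====
-- the for-loop with its early 'return lista': recursion over the range list carrying 'lista'
def tstLoop (n : Int) : List Int → List Int → List Int
  | [], lista => lista
  | i :: rest, lista => if i ^ 2 ≤ 2 * n then tstLoop n rest (lista ++ [i ^ 2]) else lista

def tst (n : Int) : List Int := tstLoop n (PySem.List.pyRange 1 n 1) []

-- ===== PORT B =====
-- math.isqrt(m) for m ≥ 0 is Int.sqrt m (largest i with i*i ≤ m)
def tst_alt (n : Int) : List Int :=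
  let k := min (n - 1) (Int.sqrt (max 0 (2 * n)))
  (PySem.List.pyRange 1 (k + 1) 1).map (fun i => i * i)

-- ===== PRECONDITION & SPEC =====
def Spec_tst (n : Int) (out : List Int) : Prop := out = tst_alt n
instance (n : Int) (out : List Int) : Decidable (Spec_tst n out) := by unfold Spec_tst; infer_instance

-- ===== CLAIM (what is proved, stated in full; the proofs are below) =====
def Claim_equal_tst : Prop := ∀ (n : Int), Dom_tst n → Spec_tst n (tst n)

-- ===== LEMMAS AND PROOFS =====

-- the loop's test, for i ≥ 1, is exactly 'i ≤ isqrt(max 0 (2n))'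
theorem tst_key (n a : Int) (ha : 1 ≤ a) :
    a ^ 2 ≤ 2 * n ↔ a ≤ Int.sqrt (max 0 (2 * n)) := by
  have hm : (0 : Int) ≤ max 0 (2 * n) := le_max_left _ _
  unfold Int.sqrt
  constructor
  · intro h
    have h2 : a ^ 2 ≤ max 0 (2 * n) := le_max_of_le_right h
    have hnat : a.toNat * a.toNat ≤ (max 0 (2 * n)).toNat := by
      have := Int.toNat_le_toNat h2
      calc a.toNat * a.toNat = (a ^ 2).toNat := by
            rw [pow_two]; exact (Int.toNat_mul (by omega) (by omega)).symm
        _ ≤ _ := Int.toNat_le_toNat h2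
    have := Nat.le_sqrt.mpr hnat
    omega
  · intro h
    have hnat : a.toNat ≤ Nat.sqrt (max 0 (2 * n)).toNat := by omega
    have hsq : a.toNat * a.toNat ≤ (max 0 (2 * n)).toNat := Nat.le_sqrt.mp hnat
    have h2 : a ^ 2 ≤ max 0 (2 * n) := by
      have h1 : ((a.toNat * a.toNat : Nat) : Int) ≤ (((max 0 (2 * n)).toNat : Nat) : Int) :=
        Int.ofNat_le.mpr hsq
      push_cast at h1
      rw [Int.toNat_of_nonneg hm, Int.toNat_of_nonneg (by omega : (0:Int) ≤ a)] at h1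
      rw [pow_two]; exact h1
    have hpos : (1 : Int) ≤ a ^ 2 := by nlinarith
    omega

theorem tst_loop_eq (n a b : Int) (acc : List Int) (ha : 1 ≤ a) :
    tstLoop n (PySem.List.pyRange a b 1) acc
      = acc ++ (PySem.List.pyRange a (min b (Int.sqrt (max 0 (2 * n)) + 1)) 1).map (fun i => i * i) := by
  by_cases hab : b ≤ a
  · rw [PySem.List.pyRange_one_eq_nil hab,
        PySem.List.pyRange_one_eq_nil (show min b (Int.sqrt (max 0 (2 * n)) + 1) ≤ a by omega)]
    simp [tstLoop]
  · push Not at hab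
    rw [PySem.List.pyRange_one_cons hab]
    by_cases hcond : a ^ 2 ≤ 2 * n
    · have hle : a ≤ Int.sqrt (max 0 (2 * n)) := (tst_key n a ha).mp hcond
      rw [tstLoop, if_pos hcond, tst_loop_eq n (a + 1) b _ (by omega)]
      rw [PySem.List.pyRange_one_cons
            (show a < min b (Int.sqrt (max 0 (2 * n)) + 1) by omega)]
      simp [pow_two]
    · have hgt : Int.sqrt (max 0 (2 * n)) < a := by
        by_contra h
        exact hcond ((tst_key n a ha).mpr (by omega))
      rw [tstLoop, if_neg hcond,
          PySem.List.pyRange_one_eq_nil (show min b (Int.sqrt (max 0 (2 * n)) + 1) ≤ a by omega)]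
      simp
termination_by (b - a).toNat
decreasing_by omega

-- ===== VERDICT (by name: the statement is the Claim_ definition above) =====
theorem tst_spec : Claim_equal_tst := by
  intro n _
  unfold Spec_tst tst tst_alt
  rw [tst_loop_eq n 1 n [] le_rfl]
  have : min n (Int.sqrt (max 0 (2 * n)) + 1) = min (n - 1) (Int.sqrt (max 0 (2 * n))) + 1 := by
    omega
  simp [this]
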